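-- pv_equiv track=rewrite | github.com/sigserverless/Dilu | scheduling/data/calculate_threshold.py | calculate_intervals
-- ===== SOURCE A (Python) =====
-- def calculate_intervals(data):
--     intervals = []
--     current_interval = 0
--     for rps in data:
--         if rps > 0:
--             if current_interval > 0:
--                 intervals.append(current_interval)
--                 current_interval = 0
--         else:
--             current_interval += 1
--     if current_interval > 0:
--         intervals.append(current_interval)
--     return intervals
-- ===== SOURCE B (Python) =====
-- def calculate_intervals(data):
--     # Decompose into maximal runs of equal sign-predicate (x > 0): scan each run
--     # with an inner loop, record the length of every non-positive run.
--     res = []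
--     i, n = 0, len(data)
--     while i < n:
--         j = i
--         while j < n and (data[j] > 0) == (data[i] > 0):
--             j += 1
--         if not (data[i] > 0):
--             res.append(j - i)
--         i = j
--     return res
-- ===== Notes on version B (the rewrite author's own statement) =====
-- stated objective: alternative
-- what changed: B splits the list into maximal runs of equal sign-predicate with an inner run-scanning loop and emits the length of each non-positive run, instead of A's element-by-element counter with transition/end flushing.
import Mathlib
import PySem

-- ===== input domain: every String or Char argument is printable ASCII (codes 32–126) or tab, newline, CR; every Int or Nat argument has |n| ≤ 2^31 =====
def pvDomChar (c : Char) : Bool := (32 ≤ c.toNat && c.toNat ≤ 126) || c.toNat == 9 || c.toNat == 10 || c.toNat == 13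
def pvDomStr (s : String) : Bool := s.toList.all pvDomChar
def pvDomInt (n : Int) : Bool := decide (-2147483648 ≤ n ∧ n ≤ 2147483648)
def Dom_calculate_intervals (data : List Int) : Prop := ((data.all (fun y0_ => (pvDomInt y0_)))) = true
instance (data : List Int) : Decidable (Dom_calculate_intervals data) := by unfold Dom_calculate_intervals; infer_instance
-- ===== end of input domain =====

-- B replaces A's counter-with-flush scan by a run-decomposition: scan each maximal
-- run of equal sign-predicate and emit the length of each non-positive run (alternative, same cost).


-- ===== PORT A =====
-- the for-loop over data with state (intervals, current_interval), then the final flush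
def calcLoopA : List Int → List Int → Int → List Int
  | [], intervals, cur => if cur > 0 then intervals ++ [cur] else intervals
  | x :: xs, intervals, cur =>
      if x > 0 then
        if cur > 0 then calcLoopA xs (intervals ++ [cur]) 0
        else calcLoopA xs intervals cur
      else calcLoopA xs intervals (cur + 1)

def calculate_intervals (data : List Int) : List Int := calcLoopA data [] 0

-- ===== PORT B =====
-- inner while loop of Source B: length of the maximal prefix of xs whose (x > 0) equals k, and the rest
def spanKey (k : Bool) : List Int → Int × List Int
  | [] => (0, [])
  | x :: xs =>
      if decide (x > 0) = k then
        let p := spanKey k xs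
        (p.1 + 1, p.2)
      else (0, x :: xs)

theorem spanKey_len (k : Bool) : ∀ (xs : List Int), (spanKey k xs).2.length ≤ xs.length
  | [] => le_refl _
  | x :: xs => by
      simp only [spanKey]
      split
      · exact le_trans (spanKey_len k xs) (Nat.le_succ _)
      · exact le_refl _

-- outer while loop of Source B: recursion over the remaining suffix, one run at a time
def runScan : List Int → List Int
  | [] => []
  | x :: xs =>
      let p := spanKey (decide (x > 0)) xs
      if x > 0 then runScan p.2 else (p.1 + 1) :: runScan p.2
termination_by xs => xs.length
decreasing_by all_goals exact Nat.lt_succ_of_le (spanKey_len _ xs)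

def calculate_intervals_alt (data : List Int) : List Int := runScan data

-- ===== PRECONDITION & SPEC =====
def Spec_calculate_intervals (data : List Int) (out : List Int) : Prop := out = calculate_intervals_alt data
instance (data : List Int) (out : List Int) : Decidable (Spec_calculate_intervals data out) := by unfold Spec_calculate_intervals; infer_instance

-- ===== CLAIM (what is proved, stated in full; the proofs are below) =====
def Claim_equal_calculate_intervals : Prop := ∀ (data : List Int), Dom_calculate_intervals data → Spec_calculate_intervals data (calculate_intervals data)

-- ===== LEMMAS AND PROOFS =====

theorem spanKey_nonneg (k : Bool) : ∀ (xs : List Int), 0 ≤ (spanKey k xs).1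
  | [] => le_refl _
  | x :: xs => by
      simp only [spanKey]
      split
      · have := spanKey_nonneg k xs; omega
      · exact le_refl _

-- prepending a finished accumulator commutes with the loop
theorem calcLoopA_append : ∀ (xs I : List Int) (cur : Int),
    calcLoopA xs I cur = I ++ calcLoopA xs [] cur
  | [], I, cur => by simp only [calcLoopA]; split <;> simp
  | x :: xs, I, cur => by
      simp only [calcLoopA]
      split
      · split
        · simp only [List.nil_append]
          rw [calcLoopA_append xs (I ++ [cur]) 0, calcLoopA_append xs [cur] 0]
          simp
        · exact calcLoopA_append xs I cur
      · exact calcLoopA_append xs I (cur + 1)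

-- runScan ignores a leading positive run
theorem runScan_spanTrue (xs : List Int) : runScan ((spanKey true xs).2) = runScan xs := by
  cases xs with
  | nil => rfl
  | cons y t =>
      by_cases hy : y > 0
      · simp only [spanKey, runScan, hy, decide_true, if_pos]
      · simp only [spanKey, hy, decide_false, Bool.false_eq_true, if_neg, not_false_iff]

-- folding the leading non-positive run back into runScan
theorem runScan_spanFalse (xs : List Int) :
    (if (spanKey false xs).1 > 0 then (spanKey false xs).1 :: runScan ((spanKey false xs).2)
     else runScan ((spanKey false xs).2)) = runScan xs := by
  cases xs with
  | nil => simp [spanKey, runScan]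
  | cons y t =>
      by_cases hy : y > 0
      · simp only [spanKey, hy, decide_true, Bool.true_eq_false, if_neg, not_false_iff]
        simp [runScan_spanTrue, runScan, hy]
      · have hn := spanKey_nonneg false t
        simp only [spanKey, hy, decide_false]
        have hpos : (spanKey false t).1 + 1 > 0 := by omega
        simp only [hpos, if_pos]
        simp [runScan, hy]

-- the loop invariant: with pending counter cur ≥ 0, the loop's result is the leading
-- non-positive run (extended by cur) followed by runScan of the rest
theorem calcLoopA_main : ∀ (xs : List Int) (cur : Int), 0 ≤ cur →
    calcLoopA xs [] cur =
      (if cur + (spanKey false xs).1 > 0 then (cur + (spanKey false xs).1) :: runScan ((spanKey false xs).2)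
       else runScan ((spanKey false xs).2))
  | [], cur, _ => by simp [calcLoopA, spanKey, runScan]
  | x :: xs, cur, hcur => by
      by_cases hx : x > 0
      · have hA : calcLoopA (x :: xs) [] cur =
            (if cur > 0 then [cur] else []) ++ calcLoopA xs [] 0 := by
          simp only [calcLoopA, hx, if_pos]
          split
          · simpa using calcLoopA_append xs [cur] 0
          · have hc : cur = 0 := by omega
            rw [hc]
            simp
        rw [hA, calcLoopA_main xs 0 (le_refl 0)]
        have hB : (if (0:Int) + (spanKey false xs).1 > 0
              then ((0:Int) + (spanKey false xs).1) :: runScan ((spanKey false xs).2)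
              else runScan ((spanKey false xs).2)) = runScan xs := by
          simpa using runScan_spanFalse xs
        rw [hB]
        have hsp : spanKey false (x :: xs) = (0, x :: xs) := by
          simp [spanKey, hx]
        rw [hsp]
        have hrs : runScan (x :: xs) = runScan xs := by
          simp only [runScan, hx, if_pos, runScan_spanTrue, decide_true]
        simp only [hrs]
        split <;> simp_all
      · have hsp : spanKey false (x :: xs) = ((spanKey false xs).1 + 1, (spanKey false xs).2) := by
          simp [spanKey, hx]
        have hn := spanKey_nonneg false xs
        have hL : calcLoopA (x :: xs) [] cur = calcLoopA xs [] (cur + 1) := by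
          simp [calcLoopA, hx]
        rw [hL, calcLoopA_main xs (cur + 1) (by omega), hsp]
        have h1 : cur + 1 + (spanKey false xs).1 > 0 := by omega
        have h2 : cur + ((spanKey false xs).1 + 1) > 0 := by omega
        simp only [h1, h2, if_pos]
        congr 1
        omega

-- ===== VERDICT (by name: the statement is the Claim_ definition above) =====
theorem calculate_intervals_spec : Claim_equal_calculate_intervals := by
  intro data _
  show calculate_intervals data = calculate_intervals_alt data
  unfold calculate_intervals calculate_intervals_alt
  rw [calcLoopA_main data 0 (le_refl 0)]
  simpa using runScan_spanFalse data
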